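-- pv_equiv track=rewrite | github.com/qcryptly/chemical-machines | cm-libraries/python/cm/symbols/display.py | _compute_inner_product_terms
-- ===== SOURCE A (Python) =====
-- from typing import Optional, List, Union, Dict, Set, Tuple, Any
--
-- def _compute_inner_product_terms(bra_terms: List[tuple], ket_terms: List[tuple],
--                                   orthogonal: bool = False,
--                                   orthogonal_states: Optional[List[str]] = None) -> List[tuple]:
--     """
--     Compute inner product terms between two symbolic determinant expansions.
--
--     When orthogonality is specified, applies Kronecker delta: ⟨φᵢ|φⱼ⟩ = δᵢⱼ
--     Non-matching overlaps evaluate to zero.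
--
--     Args:
--         bra_terms: Symbolic determinant expansion for bra (from _symbolic_determinant)
--         ket_terms: Symbolic determinant expansion for ket (from _symbolic_determinant)
--         orthogonal: If True, all states are orthonormal (⟨i|j⟩ = δᵢⱼ)
--         orthogonal_states: Optional list of states that are orthogonal to each other.
--                           If provided, only these states follow orthogonality rules.
--
--     Returns:
--         List of (sign, bra_elements, ket_elements) tuples representing surviving terms
--     """
--     result = []
--
--     for bra_sign, bra_elems in bra_terms:
--         for ket_sign, ket_elems in ket_terms:
--             combined_sign = bra_sign * ket_sign
--
--             if orthogonal:
--                 # Check if all elements match (Kronecker delta condition)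
--                 # For orthonormal states: ⟨a,b,c|d,e,f⟩ = δ_ad·δ_be·δ_cf
--                 if len(bra_elems) != len(ket_elems):
--                     continue
--
--                 # Check pairwise orthogonality
--                 all_match = True
--                 for b, k in zip(bra_elems, ket_elems):
--                     b_str, k_str = str(b), str(k)
--                     if orthogonal_states is not None:
--                         # Only apply orthogonality to specified states
--                         if b_str in orthogonal_states and k_str in orthogonal_states:
--                             if b_str != k_str:
--                                 all_match = False
--                                 break
--                     else:
--                         # All states are orthogonal
--                         if b_str != k_str:
--                             all_match = False
--                             break
--
--                 if all_match:
--                     result.append((combined_sign, bra_elems, ket_elems))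
--             else:
--                 # No orthogonality - keep all terms
--                 result.append((combined_sign, bra_elems, ket_elems))
--
--     return result
-- ===== SOURCE B (Python) =====
-- from typing import Optional, List
--
-- def _compute_inner_product_terms(bra_terms: List[tuple], ket_terms: List[tuple],
--                                  orthogonal: bool = False,
--                                  orthogonal_states: Optional[List[str]] = None) -> List[tuple]:
--     if not orthogonal:
--         # No orthogonality: full cross product.
--         return [(bs * ks, be, ke) for bs, be in bra_terms for ks, ke in ket_terms]
--
--     if orthogonal_states is None:
--         # All states orthonormal: a term survives iff the element strings are
--         # identical position by position, i.e. the key tuples are equal.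
--         # Index ket terms by key once, then look each bra key up.
--         index = {}
--         for term in ket_terms:
--             index.setdefault(tuple(str(x) for x in term[1]), []).append(term)
--         return [(bs * ks, be, ke)
--                 for bs, be in bra_terms
--                 for ks, ke in index.get(tuple(str(x) for x in be), [])]
--
--     # Partial orthogonality: pairwise test, one comprehension.
--     states = set(orthogonal_states)
--     return [(bs * ks, be, ke)
--             for bs, be in bra_terms
--             for ks, ke in ket_terms
--             if len(be) == len(ke) and all(
--                 str(b) == str(k) or str(b) not in states or str(k) not in states
--                 for b, k in zip(be, ke))]
-- ===== Notes on version B (the rewrite author's own statement) =====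
-- stated objective: alternative
-- what changed: B replaces A's nested all-pairs loop with early-break matching by three flat comprehensions, and in the fully-orthogonal case (orthogonal=True, orthogonal_states=None) builds a dict indexing ket terms by their element-string tuple once and looks each bra term's key up instead of scanning all kets.
import Mathlib
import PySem

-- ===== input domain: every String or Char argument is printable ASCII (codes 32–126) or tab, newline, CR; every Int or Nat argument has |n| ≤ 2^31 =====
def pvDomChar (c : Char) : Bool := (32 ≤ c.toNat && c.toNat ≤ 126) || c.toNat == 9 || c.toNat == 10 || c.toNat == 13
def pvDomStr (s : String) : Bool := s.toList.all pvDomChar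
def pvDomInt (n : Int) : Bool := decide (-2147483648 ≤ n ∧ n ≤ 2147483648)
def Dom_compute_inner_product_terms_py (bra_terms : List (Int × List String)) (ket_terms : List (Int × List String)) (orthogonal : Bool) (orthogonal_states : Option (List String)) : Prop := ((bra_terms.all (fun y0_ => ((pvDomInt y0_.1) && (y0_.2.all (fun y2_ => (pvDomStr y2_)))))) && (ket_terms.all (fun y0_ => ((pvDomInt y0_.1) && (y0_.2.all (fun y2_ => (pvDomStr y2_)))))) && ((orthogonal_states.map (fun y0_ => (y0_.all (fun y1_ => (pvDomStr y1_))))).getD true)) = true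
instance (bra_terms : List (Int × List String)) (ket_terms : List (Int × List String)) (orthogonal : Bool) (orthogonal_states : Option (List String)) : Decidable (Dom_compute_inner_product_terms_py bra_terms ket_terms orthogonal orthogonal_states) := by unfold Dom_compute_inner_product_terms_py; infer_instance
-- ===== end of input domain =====

-- B replaces A's nested loops with early-break matching by flat comprehensions and, in the
-- fully orthogonal case, a dict index of ket terms keyed by element tuple (objective: alternative).

-- ===== PORT A =====
-- A's inner `for b, k in zip(...)` loop with its early break (`all_match` check).
def pvAllMatchA (orthogonal_states : Option (List String)) : List (String × String) → Bool
  | [] => true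
  | (b, k) :: rest =>
    match orthogonal_states with
    | some states =>
      if states.contains b && states.contains k then
        if b != k then false else pvAllMatchA orthogonal_states rest
      else pvAllMatchA orthogonal_states rest
    | none =>
      if b != k then false else pvAllMatchA orthogonal_states rest

def compute_inner_product_terms_py (bra_terms : List (Int × List String)) (ket_terms : List (Int × List String)) (orthogonal : Bool) (orthogonal_states : Option (List String)) : List (Int × List String × List String) :=
  bra_terms.foldl (fun result bra =>
    ket_terms.foldl (fun result ket =>
      let combined_sign := bra.1 * ket.1
      if orthogonal then
        if bra.2.length != ket.2.length then result
        else if pvAllMatchA orthogonal_states (bra.2.zip ket.2) then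
          result ++ [(combined_sign, bra.2, ket.2)]
        else result
      else result ++ [(combined_sign, bra.2, ket.2)]) result) []

-- ===== PORT B =====
def compute_inner_product_terms_py_alt (bra_terms : List (Int × List String)) (ket_terms : List (Int × List String)) (orthogonal : Bool) (orthogonal_states : Option (List String)) : List (Int × List String × List String) :=
  if !orthogonal then
    bra_terms.flatMap (fun bra => ket_terms.map (fun ket => (bra.1 * ket.1, bra.2, ket.2)))
  else
    match orthogonal_states with
    | none =>
      -- index.setdefault(key, []).append(term)
      let index : PySem.Dict (List String) (List (Int × List String)) :=
        ket_terms.foldl (fun d ket => d.modify ket.2 [] (· ++ [ket])) PySem.Dict.empty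
      bra_terms.flatMap (fun bra =>
        (index.getD bra.2 []).map (fun ket => (bra.1 * ket.1, bra.2, ket.2)))
    | some states =>
      bra_terms.flatMap (fun bra =>
        (ket_terms.filter (fun ket =>
          bra.2.length == ket.2.length &&
          (bra.2.zip ket.2).all (fun p =>
            p.1 == p.2 || !states.contains p.1 || !states.contains p.2))).map
          (fun ket => (bra.1 * ket.1, bra.2, ket.2)))

-- ===== PRECONDITION & SPEC =====
def Spec_compute_inner_product_terms_py (bra_terms : List (Int × List String)) (ket_terms : List (Int × List String)) (orthogonal : Bool) (orthogonal_states : Option (List String)) (out : List (Int × List String × List String)) : Prop := out = compute_inner_product_terms_py_alt bra_terms ket_terms orthogonal orthogonal_states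
instance (bra_terms : List (Int × List String)) (ket_terms : List (Int × List String)) (orthogonal : Bool) (orthogonal_states : Option (List String)) (out : List (Int × List String × List String)) : Decidable (Spec_compute_inner_product_terms_py bra_terms ket_terms orthogonal orthogonal_states out) := by unfold Spec_compute_inner_product_terms_py; infer_instance

-- ===== CLAIM (what is proved, stated in full; the proofs are below) =====
def Claim_equal_compute_inner_product_terms_py : Prop := ∀ (bra_terms : List (Int × List String)) (ket_terms : List (Int × List String)) (orthogonal : Bool) (orthogonal_states : Option (List String)), Dom_compute_inner_product_terms_py bra_terms ket_terms orthogonal orthogonal_states → Spec_compute_inner_product_terms_py bra_terms ket_terms orthogonal orthogonal_states (compute_inner_product_terms_py bra_terms ket_terms orthogonal orthogonal_states)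

-- ===== LEMMAS AND PROOFS =====

-- Equal length plus A's pairwise all-match (no orthogonal_states) is exactly list equality of the keys.
lemma pvKeyEq : ∀ (xs ys : List String),
    ((xs.length == ys.length) && pvAllMatchA none (xs.zip ys)) = (ys == xs)
  | [], [] => by simp [pvAllMatchA]
  | [], _ :: _ => by simp [pvAllMatchA]
  | _ :: _, [] => by simp [pvAllMatchA]
  | x :: xs, y :: ys => by
    by_cases hxy : x = y
    · subst hxy
      simpa [pvAllMatchA, List.zip] using pvKeyEq xs ys
    · have hbk : (x == y) = false := beq_eq_false_iff_ne.mpr hxy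
      have hkb : (y == x) = false := beq_eq_false_iff_ne.mpr (Ne.symm hxy)
      simp [pvAllMatchA, List.zip, bne, hbk, hkb]

-- A's early-break loop with an orthogonal_states list is B's `all` over the zipped pair list.
lemma pvAllMatchA_some (states : List String) : ∀ (ps : List (String × String)),
    pvAllMatchA (some states) ps
      = ps.all (fun p => p.1 == p.2 || !states.contains p.1 || !states.contains p.2)
  | [] => by simp [pvAllMatchA]
  | (b, k) :: rest => by
    have hrec := pvAllMatchA_some states rest
    by_cases hbk : b = k
    · subst hbk
      simp [pvAllMatchA, hrec]
    · have hbk' : (b == k) = false := beq_eq_false_iff_ne.mpr hbk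
      by_cases hb : b ∈ states <;> by_cases hk : k ∈ states <;>
        simp [pvAllMatchA, hb, hk, hbk', bne, hrec]

-- B's grouping dict looked up at a key is the filter of ket_terms with that key.
lemma pvIndexGetD (ket_terms : List (Int × List String)) (key : List String) :
    ((ket_terms.foldl (fun d ket => d.modify ket.2 [] (· ++ [ket]))
        (PySem.Dict.empty : PySem.Dict (List String) (List (Int × List String)))).getD key [])
      = ket_terms.filter (fun ket => ket.2 == key) := by
  have h : ket_terms.foldl (fun d ket => d.modify ket.2 [] (· ++ [ket]))
        (PySem.Dict.empty : PySem.Dict (List String) (List (Int × List String)))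
      = (ket_terms.map (fun t => (t.2, t))).foldl
          (fun d p => d.modify p.1 [] (· ++ [p.2])) PySem.Dict.empty := by
    rw [List.foldl_map]
  rw [h, PySem.Dict.getD_foldl_modify_append]
  simp [List.filter_map, Function.comp_def, PySem.Dict.getD_empty]

theorem compute_inner_product_terms_py_spec : Claim_equal_compute_inner_product_terms_py := by
  intro bra_terms ket_terms orthogonal orthogonal_states _dom
  unfold Spec_compute_inner_product_terms_py
  unfold compute_inner_product_terms_py compute_inner_product_terms_py_alt
  cases orthogonal with
  | false =>
    simp only [Bool.not_false, if_pos, Bool.false_eq_true, ite_false]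
    have h : ∀ (acc : List (Int × List String × List String)) (bra : Int × List String),
        bra ∈ bra_terms →
        ket_terms.foldl (fun result ket => result ++ [(bra.1 * ket.1, bra.2, ket.2)]) acc
          = acc ++ ket_terms.map (fun ket => (bra.1 * ket.1, bra.2, ket.2)) := by
      intro acc bra _
      exact PySem.List.foldl_append_singleton_eq_map _ _ _
    rw [PySem.List.foldl_congr_mem _ _ _ _ h, PySem.List.foldl_append_eq_flatMap]
    simp
  | true =>
    cases orthogonal_states with
    | none =>
      simp only [Bool.not_true, Bool.false_eq_true, ite_false, ite_true]
      have h : ∀ (acc : List (Int × List String × List String)) (bra : Int × List String),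
          bra ∈ bra_terms →
          ket_terms.foldl (fun result ket =>
              if bra.2.length != ket.2.length then result
              else if pvAllMatchA none (bra.2.zip ket.2) then
                result ++ [(bra.1 * ket.1, bra.2, ket.2)]
              else result) acc
            = acc ++ (ket_terms.filter (fun ket => ket.2 == bra.2)).map
                (fun ket => (bra.1 * ket.1, bra.2, ket.2)) := by
        intro acc bra _
        have hf : (fun (result : List (Int × List String × List String)) (ket : Int × List String) =>
              if bra.2.length != ket.2.length then result
              else if pvAllMatchA none (bra.2.zip ket.2) then
                result ++ [(bra.1 * ket.1, bra.2, ket.2)]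
              else result)
            = (fun result ket =>
              if ket.2 == bra.2 then result ++ [(bra.1 * ket.1, bra.2, ket.2)] else result) := by
          funext result ket
          rw [← pvKeyEq bra.2 ket.2]
          cases hlen : (bra.2.length == ket.2.length) <;>
            cases hm : pvAllMatchA none (bra.2.zip ket.2) <;> simp [bne, hlen, hm]
        rw [hf]
        exact PySem.List.foldl_append_if _ _ _ _
      rw [PySem.List.foldl_congr_mem _ _ _ _ h, PySem.List.foldl_append_eq_flatMap]
      simp only [List.nil_append]
      refine List.flatMap_congr ?_
      intro bra _
      rw [pvIndexGetD]
    | some states =>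
      simp only [Bool.not_true, Bool.false_eq_true, ite_false, ite_true]
      have h : ∀ (acc : List (Int × List String × List String)) (bra : Int × List String),
          bra ∈ bra_terms →
          ket_terms.foldl (fun result ket =>
              if bra.2.length != ket.2.length then result
              else if pvAllMatchA (some states) (bra.2.zip ket.2) then
                result ++ [(bra.1 * ket.1, bra.2, ket.2)]
              else result) acc
            = acc ++ (ket_terms.filter (fun ket =>
                bra.2.length == ket.2.length &&
                (bra.2.zip ket.2).all (fun p =>
                  p.1 == p.2 || !states.contains p.1 || !states.contains p.2))).map
                (fun ket => (bra.1 * ket.1, bra.2, ket.2)) := by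
        intro acc bra _
        have hf : (fun (result : List (Int × List String × List String)) (ket : Int × List String) =>
              if bra.2.length != ket.2.length then result
              else if pvAllMatchA (some states) (bra.2.zip ket.2) then
                result ++ [(bra.1 * ket.1, bra.2, ket.2)]
              else result)
            = (fun result ket =>
              if (bra.2.length == ket.2.length &&
                  (bra.2.zip ket.2).all (fun p =>
                    p.1 == p.2 || !states.contains p.1 || !states.contains p.2)) then
                result ++ [(bra.1 * ket.1, bra.2, ket.2)]
              else result) := by
          funext result ket
          rw [← pvAllMatchA_some states (bra.2.zip ket.2)]
          cases hlen : (bra.2.length == ket.2.length) <;>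
            cases hm : pvAllMatchA (some states) (bra.2.zip ket.2) <;> simp [bne, hlen, hm]
        rw [hf]
        exact PySem.List.foldl_append_if _ _ _ _
      rw [PySem.List.foldl_congr_mem _ _ _ _ h, PySem.List.foldl_append_eq_flatMap]
      simp
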